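-- pv_equiv track=rewrite | github.com/sw-song/sw-song.github.io | apply_categories_by_tistory_order.py | build_category_assignment
-- ===== SOURCE A (Python) =====
-- TISTORY_DISTRIBUTION = [
--     # 4. 실전 categories (most recent posts)
--     (5, "4. 실전", "글로벌 매크로 분석"),           # 5 recent posts
--     (3, "4. 실전", "계량 투자 분석"),               # 3 posts
--
--     # 3. 튜토리얼 categories
--     (11, "3. 튜토리얼", "금융 분석 프로그래밍 응용"),    # 11 posts - APPLIED
--     (6, "3. 튜토리얼", "금융 분석 프로그래밍 기초"),    # 6 posts - BASICS (including supplements)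
--     (6, "3. 튜토리얼", "비즈니스 통계 분석 프로그래밍"),  # 6 posts
--     (4, "3. 튜토리얼", "시계열 예측 및 계량 분석 방법론"), # 4 posts
--     (2, "3. 튜토리얼", "자연어 처리 및 텍스트 분석 방법론"), # 2 posts
--
--     # 2. 도메인 categories
--     (1, "2. 도메인", "자산운용"),                   # 1 post
--     (6, "2. 도메인", "금융"),                       # 6 posts
--     (2, "2. 도메인", "비즈니스"),                    # 2 posts
--
--     # 1. 기술 categories (oldest posts, highest volume)
--     (7, "1. 기술", "통계, 시계열"),                 # 7 posts
--     (24, "1. 기술", "머신러닝, 딥러닝"),             # 24 posts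
--     (20, "1. 기술", "서버, 데이터, 클라우드"),        # 20 posts
--     (15, "1. 기술", "웹, 자바스크립트"),             # 15 posts
--     (0, "1. 기술", "인프라, 네트워크"),              # 0 posts
-- ]
--
-- def build_category_assignment(posts):
--     """
--     Build category assignment based on post order.
--     Posts are typically ordered from newest to oldest in GitHub (matching Tistory order).
--     Assign categories based on the Tistory distribution.
--     """
--
--     # Calculate cumulative positions
--     assignment = {}
--     current_pos = 0
--
--     for count, main_cat, sub_cat in TISTORY_DISTRIBUTION:
--         for i in range(count):
--             if current_pos < len(posts):
--                 assignment[posts[current_pos]] = [main_cat, sub_cat]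
--                 current_pos += 1
--
--     return assignment, current_pos
-- ===== SOURCE B (Python) =====
-- TISTORY_DISTRIBUTION = [
--     (5, "4. 실전", "글로벌 매크로 분석"),
--     (3, "4. 실전", "계량 투자 분석"),
--     (11, "3. 튜토리얼", "금융 분석 프로그래밍 응용"),
--     (6, "3. 튜토리얼", "금융 분석 프로그래밍 기초"),
--     (6, "3. 튜토리얼", "비즈니스 통계 분석 프로그래밍"),
--     (4, "3. 튜토리얼", "시계열 예측 및 계량 분석 방법론"),
--     (2, "3. 튜토리얼", "자연어 처리 및 텍스트 분석 방법론"),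
--     (1, "2. 도메인", "자산운용"),
--     (6, "2. 도메인", "금융"),
--     (2, "2. 도메인", "비즈니스"),
--     (7, "1. 기술", "통계, 시계열"),
--     (24, "1. 기술", "머신러닝, 딥러닝"),
--     (20, "1. 기술", "서버, 데이터, 클라우드"),
--     (15, "1. 기술", "웹, 자바스크립트"),
--     (0, "1. 기술", "인프라, 네트워크"),
-- ]
--
-- def build_category_assignment(posts):
--     # Expand the distribution once into a flat label table, then assign by index.
--     labels = [[main_cat, sub_cat]
--               for count, main_cat, sub_cat in TISTORY_DISTRIBUTION
--               for _ in range(count)]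
--     n = min(len(posts), len(labels))
--     assignment = {posts[i]: labels[i] for i in range(n)}
--     return assignment, n
-- ===== Notes on version B (the rewrite author's own statement) =====
-- stated objective: simpler
-- what changed: Replaces the fused nested loop with a guarded running cursor by a flat label table built once from the distribution, n = min(len(posts), len(labels)), and a single index-based dict comprehension.
import Mathlib
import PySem

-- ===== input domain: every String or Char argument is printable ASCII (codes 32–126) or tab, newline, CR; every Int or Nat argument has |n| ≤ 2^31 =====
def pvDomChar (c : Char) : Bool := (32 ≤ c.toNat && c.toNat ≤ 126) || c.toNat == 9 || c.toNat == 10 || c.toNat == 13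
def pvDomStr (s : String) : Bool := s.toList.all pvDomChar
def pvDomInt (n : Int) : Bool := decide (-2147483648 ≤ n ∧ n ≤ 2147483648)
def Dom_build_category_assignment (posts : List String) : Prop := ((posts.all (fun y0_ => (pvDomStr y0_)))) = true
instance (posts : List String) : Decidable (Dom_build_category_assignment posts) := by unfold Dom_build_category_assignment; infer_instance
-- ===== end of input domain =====

-- B separates a one-off flat label table from a single index-based assignment pass
-- (objective: simpler decomposition than A's fused nested loop with a guarded cursor).

def TISTORY_DISTRIBUTION : List (Int × String × String) := [
  (5, "4. 실전", "글로벌 매크로 분석"),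
  (3, "4. 실전", "계량 투자 분석"),
  (11, "3. 튜토리얼", "금융 분석 프로그래밍 응용"),
  (6, "3. 튜토리얼", "금융 분석 프로그래밍 기초"),
  (6, "3. 튜토리얼", "비즈니스 통계 분석 프로그래밍"),
  (4, "3. 튜토리얼", "시계열 예측 및 계량 분석 방법론"),
  (2, "3. 튜토리얼", "자연어 처리 및 텍스트 분석 방법론"),
  (1, "2. 도메인", "자산운용"),
  (6, "2. 도메인", "금융"),
  (2, "2. 도메인", "비즈니스"),
  (7, "1. 기술", "통계, 시계열"),
  (24, "1. 기술", "머신러닝, 딥러닝"),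
  (20, "1. 기술", "서버, 데이터, 클라우드"),
  (15, "1. 기술", "웹, 자바스크립트"),
  (0, "1. 기술", "인프라, 네트워크")]

-- ===== PORT A =====
-- the body of A's inner loop: assign the current post when the cursor is still in range
-- (posts[current_pos] is guarded by current_pos < len(posts), so pyGetD is exact here)
def stepA (posts : List String) (st : PySem.Dict String (List String) × Int)
    (lab : List String) : PySem.Dict String (List String) × Int :=
  if st.2 < (posts.length : Int) then
    (st.1.insert (PySem.List.pyGetD posts st.2 "") lab, st.2 + 1)
  else st

def build_category_assignment (posts : List String) : (List (String × List String)) × Int :=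
  let st := TISTORY_DISTRIBUTION.foldl
    (fun st e => (PySem.List.pyRange 0 e.1 1).foldl (fun st _ => stepA posts st [e.2.1, e.2.2]) st)
    (PySem.Dict.empty, 0)
  (st.1.items, st.2)

-- ===== PORT B =====
def build_category_assignment_alt (posts : List String) : (List (String × List String)) × Int :=
  let labels := TISTORY_DISTRIBUTION.flatMap
    (fun e => (PySem.List.pyRange 0 e.1 1).map (fun _ => [e.2.1, e.2.2]))
  let n : Int := min (posts.length : Int) (labels.length : Int)
  let assignment := (PySem.List.pyRange 0 n 1).foldl
    (fun d i => d.insert (PySem.List.pyGetD posts i "") (PySem.List.pyGetD labels i []))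
    PySem.Dict.empty
  (assignment.items, n)

-- ===== PRECONDITION & SPEC =====
def Spec_build_category_assignment (posts : List String) (out : (List (String × List String)) × Int) : Prop := out = build_category_assignment_alt posts
instance (posts : List String) (out : (List (String × List String)) × Int) : Decidable (Spec_build_category_assignment posts out) := by unfold Spec_build_category_assignment; infer_instance

-- ===== CLAIM (what is proved, stated in full; the proofs are below) =====
def Claim_equal_build_category_assignment : Prop := ∀ (posts : List String), Dom_build_category_assignment posts → Spec_build_category_assignment posts (build_category_assignment posts)

-- ===== LEMMAS AND PROOFS =====

-- the flat label table (definitionally the one B builds)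
def labelsFlat : List (List String) := TISTORY_DISTRIBUTION.flatMap
  (fun e => (PySem.List.pyRange 0 e.1 1).map (fun _ => [e.2.1, e.2.2]))

-- A's nested loop is the fold of stepA over the flat label table
lemma A_eq_flat (posts : List String) :
    build_category_assignment posts =
      (((labelsFlat.foldl (stepA posts) (PySem.Dict.empty, 0)).1.items),
       (labelsFlat.foldl (stepA posts) (PySem.Dict.empty, 0)).2) := by
  unfold build_category_assignment labelsFlat
  rw [List.flatMap_def, List.foldl_flatten]
  simp only [List.foldl_map]

-- folding stepA consumes min(len(posts) - i, len(labels)) posts, pairing them with labels in order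
lemma fold_stepA_zip (posts : List String) :
    ∀ (labels : List (List String)) (d : PySem.Dict String (List String)) (i : Nat),
      i ≤ posts.length →
      labels.foldl (stepA posts) (d, (i : Int)) =
        (((posts.drop i).zip labels).foldl (fun d' (p : String × List String) => d'.insert p.1 p.2) d,
         (i : Int) + ((min (posts.length - i) labels.length : Nat) : Int)) := by
  intro labels
  induction labels with
  | nil => intro d i _; simp
  | cons lab labs ih =>
    intro d i hi
    by_cases h : i < posts.length
    · have hstep : stepA posts (d, (i : Int)) lab =
          (d.insert posts[i] lab, ((i + 1 : Nat) : Int)) := by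
        simp [stepA, h, PySem.List.pyGetD_natCast, List.getD_eq_getElem?_getD]
      rw [List.foldl_cons, hstep, ih (d.insert posts[i] lab) (i + 1) h,
          List.drop_eq_getElem_cons h]
      simp only [List.zip_cons_cons, List.foldl_cons, List.length_cons]
      congr 1
      omega
    · have hi' : i = posts.length := by omega
      have hstep : stepA posts (d, (i : Int)) lab = (d, (i : Int)) := by
        simp [stepA]; omega
      rw [List.foldl_cons, hstep, ih d i hi]
      simp [hi']

-- B's index loop over range(n) is the same zip fold
lemma range_fold_zip :
    ∀ (xs : List String) (ys : List (List String)) (d : PySem.Dict String (List String)),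
      (List.range (min xs.length ys.length)).foldl
          (fun d' k => d'.insert (xs.getD k "") (ys.getD k [])) d =
        (xs.zip ys).foldl (fun d' (p : String × List String) => d'.insert p.1 p.2) d := by
  intro xs
  induction xs with
  | nil => intro ys d; simp
  | cons x xs ih =>
    intro ys d
    cases ys with
    | nil => simp
    | cons y ys =>
      have hmin : min (x :: xs).length (y :: ys).length = min xs.length ys.length + 1 := by
        simp [Nat.succ_min_succ]
      rw [hmin, List.range_succ_eq_map, List.foldl_cons, List.foldl_map]
      simpa using ih ys (d.insert x y)

-- ===== VERDICT (by name: the statement is the Claim_ definition above) =====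
theorem build_category_assignment_spec : Claim_equal_build_category_assignment := by
  intro posts _
  unfold Spec_build_category_assignment
  have hA := fold_stepA_zip posts labelsFlat PySem.Dict.empty 0 (Nat.zero_le _)
  norm_num at hA
  rw [A_eq_flat posts, hA]
  show _ = build_category_assignment_alt posts
  simp only [build_category_assignment_alt]
  have hlab : (TISTORY_DISTRIBUTION.flatMap
      (fun e => (PySem.List.pyRange 0 e.1 1).map (fun _ => [e.2.1, e.2.2]))) = labelsFlat := rfl
  rw [hlab]
  have hn : min ((posts.length : Int)) ((labelsFlat.length : Int)) =
      ((min posts.length labelsFlat.length : Nat) : Int) := by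
    rw [Nat.cast_min]
  rw [hn, PySem.List.pyRange_zero_natCast, List.foldl_map]
  simp only [PySem.List.pyGetD_natCast]
  rw [range_fold_zip posts labelsFlat PySem.Dict.empty]
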